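-- pv_equiv track=rewrite | github.com/admariner/datahub | metadata-ingestion/tests/integration/fivetran/test_fivetran_db_vs_rest_equivalence.py | _urns_by_entity_type
-- ===== SOURCE A (Python) =====
-- from typing import Dict, Iterator, List, Set, Tuple
--
-- def _urns_by_entity_type(events: List[Dict]) -> Dict[str, Set[str]]:
--     """Group all distinct entity URNs by entity type."""
--     result: Dict[str, Set[str]] = {}
--     for ev in events:
--         urn = ev.get("entityUrn")
--         et = ev.get("entityType")
--         if urn and et:
--             result.setdefault(et, set()).add(urn)
--     return result
-- ===== SOURCE B (Python) =====
-- from typing import Dict, List, Set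
--
--
-- def _urns_by_entity_type(events: List[Dict]) -> Dict[str, Set[str]]:
--     """Group all distinct entity URNs by entity type (collect-then-group)."""
--     pairs = []
--     for ev in events:
--         urn = ev.get("entityUrn")
--         et = ev.get("entityType")
--         if urn and et:
--             pairs.append((et, urn))
--     seen_types = []
--     for et, _ in pairs:
--         if et not in seen_types:
--             seen_types.append(et)
--     return {et: {urn for t, urn in pairs if t == et} for et in seen_types}
-- ===== Notes on version B (the rewrite author's own statement) =====
-- stated objective: alternative
-- what changed: A hashes each event into a dict of sets in one pass; B first materialises the (type, urn) pair list, then derives the key order by first occurrence and builds each group with a per-key filtered set comprehension.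
import Mathlib
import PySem

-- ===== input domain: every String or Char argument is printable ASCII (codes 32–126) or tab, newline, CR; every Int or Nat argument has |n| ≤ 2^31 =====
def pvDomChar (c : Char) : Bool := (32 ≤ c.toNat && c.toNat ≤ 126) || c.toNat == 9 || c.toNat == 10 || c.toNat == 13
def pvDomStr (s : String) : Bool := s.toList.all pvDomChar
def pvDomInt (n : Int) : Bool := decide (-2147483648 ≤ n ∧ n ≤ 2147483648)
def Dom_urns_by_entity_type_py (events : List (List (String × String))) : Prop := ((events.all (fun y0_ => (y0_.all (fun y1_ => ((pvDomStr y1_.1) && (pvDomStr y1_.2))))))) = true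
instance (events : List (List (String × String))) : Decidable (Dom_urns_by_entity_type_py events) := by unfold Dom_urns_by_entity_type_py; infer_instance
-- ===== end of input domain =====

-- B replaces A's single-pass dict-of-sets accumulation by collecting the (type, urn)
-- pairs first and then grouping them per first-occurrence key (objective: alternative).

-- ===== PORT A =====
def urns_by_entity_type_py (events : List (List (String × String))) : List (String × List String) :=
  (events.foldl
    (fun (result : PySem.Dict String (PySem.Set String)) ev =>
      let urn := (PySem.Dict.ofList ev).get? "entityUrn"
      let et := (PySem.Dict.ofList ev).get? "entityType"
      match urn, et with
      | some u, some t =>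
        -- 'if urn and et': both present and non-empty (Python truthiness of str)
        if u ≠ "" ∧ t ≠ "" then result.modify t PySem.Set.empty (fun s => PySem.Set.add s u)
        else result
      | _, _ => result)
    PySem.Dict.empty).items

-- ===== PORT B =====
def urns_by_entity_type_py_alt (events : List (List (String × String))) : List (String × List String) :=
  let pairs : List (String × String) := events.foldl
    (fun acc ev =>
      let urn := (PySem.Dict.ofList ev).get? "entityUrn"
      let et := (PySem.Dict.ofList ev).get? "entityType"
      match urn with
      | none => acc
      | some u =>
        match et with
        | none => acc
        | some t => if u ≠ "" ∧ t ≠ "" then acc ++ [(t, u)] else acc) []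
  let seenTypes : PySem.Set String :=
    pairs.foldl (fun s p => PySem.Set.add s p.1) PySem.Set.empty
  seenTypes.map (fun t =>
    (t, PySem.Set.ofList ((pairs.filter (fun p => p.1 == t)).map (·.2))))

-- ===== PRECONDITION & SPEC =====
def Spec_urns_by_entity_type_py (events : List (List (String × String))) (out : List (String × List String)) : Prop := out = urns_by_entity_type_py_alt events
instance (events : List (List (String × String))) (out : List (String × List String)) : Decidable (Spec_urns_by_entity_type_py events out) := by unfold Spec_urns_by_entity_type_py; infer_instance

-- ===== CLAIM (what is proved, stated in full; the proofs are below) =====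
def Claim_equal_urns_by_entity_type_py : Prop := ∀ (events : List (List (String × String))), Dom_urns_by_entity_type_py events → Spec_urns_by_entity_type_py events (urns_by_entity_type_py events)

-- ===== LEMMAS AND PROOFS =====

/-- The (entityType, entityUrn) pair an event contributes, if any. -/
def pvPairOf (ev : List (String × String)) : Option (String × String) :=
  match (PySem.Dict.ofList ev).get? "entityUrn", (PySem.Dict.ofList ev).get? "entityType" with
  | some u, some t => if u ≠ "" ∧ t ≠ "" then some (t, u) else none
  | _, _ => none

/-- The grouping step A performs per contributing pair. -/
def pvGStep (d : PySem.Dict String (PySem.Set String)) (p : String × String) :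
    PySem.Dict String (PySem.Set String) :=
  d.modify p.1 PySem.Set.empty (fun s => PySem.Set.add s p.2)

lemma pvFoldlA_eq (events : List (List (String × String)))
    (d : PySem.Dict String (PySem.Set String)) :
    events.foldl
      (fun (result : PySem.Dict String (PySem.Set String)) ev =>
        let urn := (PySem.Dict.ofList ev).get? "entityUrn"
        let et := (PySem.Dict.ofList ev).get? "entityType"
        match urn, et with
        | some u, some t =>
          if u ≠ "" ∧ t ≠ "" then result.modify t PySem.Set.empty (fun s => PySem.Set.add s u)
          else result
        | _, _ => result) d
      = (events.filterMap pvPairOf).foldl pvGStep d := by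
  induction events generalizing d with
  | nil => rfl
  | cons ev rest ih =>
    simp only [List.foldl_cons, List.filterMap_cons]
    unfold pvPairOf
    cases hu : (PySem.Dict.ofList ev).get? "entityUrn" with
    | none => simpa using ih d
    | some u =>
      cases ht : (PySem.Dict.ofList ev).get? "entityType" with
      | none => simpa using ih d
      | some t =>
        by_cases h : u ≠ "" ∧ t ≠ ""
        · simp only [if_pos h, List.foldl_cons]
          exact ih _
        · simpa [if_neg h] using ih d

lemma pvFoldlB_eq (events : List (List (String × String)))
    (acc : List (String × String)) :
    events.foldl
      (fun acc ev =>
        let urn := (PySem.Dict.ofList ev).get? "entityUrn"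
        let et := (PySem.Dict.ofList ev).get? "entityType"
        match urn with
        | none => acc
        | some u =>
          match et with
          | none => acc
          | some t => if u ≠ "" ∧ t ≠ "" then acc ++ [(t, u)] else acc) acc
      = acc ++ events.filterMap pvPairOf := by
  induction events generalizing acc with
  | nil => simp
  | cons ev rest ih =>
    simp only [List.foldl_cons, List.filterMap_cons]
    unfold pvPairOf
    cases hu : (PySem.Dict.ofList ev).get? "entityUrn" with
    | none => simpa using ih acc
    | some u =>
      cases ht : (PySem.Dict.ofList ev).get? "entityType" with
      | none => simpa using ih acc
      | some t =>
        by_cases h : u ≠ "" ∧ t ≠ ""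
        · simp only [if_pos h]
          rw [ih]
          simp only [List.append_assoc, List.singleton_append]
          rfl
        · simpa [if_neg h] using ih acc

/-- A dict with distinct keys is determined, item by item, by its keys and lookups. -/
lemma pvItems_eq_keys_map {κ ν : Type} [BEq κ] [LawfulBEq κ]
    (l : List (κ × ν)) (h : (l.map Prod.fst).Nodup) (d0 : ν) :
    l = (l.map Prod.fst).map (fun k => (k, (PySem.Dict.mk l).getD k d0)) := by
  induction l with
  | nil => rfl
  | cons p rest ih =>
    obtain ⟨k, v⟩ := p
    simp only [List.map_cons, List.nodup_cons, List.mem_map] at h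
    simp only [List.map_cons]
    refine List.cons_eq_cons.mpr ⟨?_, ?_⟩
    · simp [PySem.Dict.getD_eq_get?_getD, PySem.Dict.get?_mk_cons]
    · refine (ih h.2).trans ?_
      apply List.map_congr_left
      intro k' hk'
      simp only [List.mem_map] at hk'
      have hne : (k == k') = false := by
        refine beq_eq_false_iff_ne.mpr ?_
        rintro rfl
        obtain ⟨a, ha, ha1⟩ := hk'
        exact h.1 ⟨a, ha, ha1⟩
      simp [PySem.Dict.getD_eq_get?_getD, PySem.Dict.get?_mk_cons, hne]

lemma pvGetD_foldl_gstep (l : List (String × String))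
    (d : PySem.Dict String (PySem.Set String)) (c : String) :
    (l.foldl pvGStep d).getD c PySem.Set.empty
      = ((l.filter (fun p => p.1 == c)).map (·.2)).foldl PySem.Set.add
          (d.getD c PySem.Set.empty) := by
  induction l generalizing d with
  | nil => rfl
  | cons p rest ih =>
    obtain ⟨t, u⟩ := p
    simp only [List.foldl_cons, List.filter_cons]
    rw [ih]
    by_cases h : t = c
    · subst h
      simp [pvGStep]
    · have : (t == c) = false := beq_eq_false_iff_ne.mpr h
      simp [pvGStep, PySem.Dict.getD_modify, this, Ne.symm h]

lemma pvItems_group (pairs : List (String × String)) :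
    ((pairs.foldl pvGStep PySem.Dict.empty).items)
      = (PySem.Set.ofList (pairs.map Prod.fst)).map (fun t =>
          (t, PySem.Set.ofList ((pairs.filter (fun p => p.1 == t)).map (·.2)))) := by
  have hkeys : (pairs.foldl pvGStep PySem.Dict.empty).keys
      = PySem.Set.ofList (pairs.map Prod.fst) := by
    have := PySem.Dict.keys_foldl_modify_key pairs (fun p => p.1) PySem.Set.empty
      (fun _ p s => PySem.Set.add s p.2) PySem.Dict.empty
    simpa [pvGStep, PySem.Set.update_nil_left, PySem.Dict.keys, PySem.Dict.empty,
      Function.comp] using this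
  have hnodup : ((pairs.foldl pvGStep PySem.Dict.empty).items.map Prod.fst).Nodup := by
    have : (pairs.foldl pvGStep PySem.Dict.empty).keys.Nodup := by
      rw [hkeys]; exact PySem.Set.nodup_ofList _
    simpa [PySem.Dict.keys] using this
  have hitems := pvItems_eq_keys_map ((pairs.foldl pvGStep PySem.Dict.empty).items)
    hnodup PySem.Set.empty
  have hmk : PySem.Dict.mk ((pairs.foldl pvGStep PySem.Dict.empty).items)
      = pairs.foldl pvGStep PySem.Dict.empty := rfl
  rw [hmk] at hitems
  calc (pairs.foldl pvGStep PySem.Dict.empty).items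
      = ((pairs.foldl pvGStep PySem.Dict.empty).items.map Prod.fst).map
          (fun k => (k, (pairs.foldl pvGStep PySem.Dict.empty).getD k PySem.Set.empty)) := hitems
    _ = (PySem.Set.ofList (pairs.map Prod.fst)).map (fun t =>
          (t, PySem.Set.ofList ((pairs.filter (fun p => p.1 == t)).map (·.2)))) := by
        have hk : ((pairs.foldl pvGStep PySem.Dict.empty).items.map Prod.fst)
            = PySem.Set.ofList (pairs.map Prod.fst) := by
          simpa [PySem.Dict.keys] using hkeys
        rw [hk]
        apply List.map_congr_left
        intro t _
        rw [pvGetD_foldl_gstep]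
        simp [PySem.Dict.getD_eq_get?_getD, PySem.Dict.empty, PySem.Dict.get?,
          PySem.Set.ofList_eq_foldl, PySem.Set.empty]

-- ===== VERDICT (by name: the statement is the Claim_ definition above) =====
theorem urns_by_entity_type_py_spec : Claim_equal_urns_by_entity_type_py := by
  intro events _
  show urns_by_entity_type_py events = urns_by_entity_type_py_alt events
  unfold urns_by_entity_type_py urns_by_entity_type_py_alt
  rw [pvFoldlA_eq, pvFoldlB_eq, pvItems_group]
  simp only [List.nil_append, ← PySem.Set.update_map_eq_foldl_add, PySem.Set.empty,
    PySem.Set.update_nil_left]
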